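-- pv_equiv track=rewrite | github.com/ankuo599/GHOST-AGI | learning/zero_knowledge_core.py | _extract_common_attributes
-- ===== SOURCE A (Python) =====
-- from typing import Dict, List, Any, Optional, Set, Union, Tuple
--
-- def _extract_common_attributes(concepts: List[Dict[str, Any]]) -> Dict[str, Any]:
--     """
--     提取概念列表中的共同属性
--
--     Args:
--         concepts: 概念列表
--
--     Returns:
--         Dict: 共同属性
--     """
--     if not concepts:
--         return {}
--
--     # 获取第一个概念的属性
--     common_attrs = concepts[0].get("attributes", {}).copy()
--
--     # 与其他概念的属性求交集
--     for concept in concepts[1:]: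
--         concept_attrs = concept.get("attributes", {})
--
--         # 删除不一致的属性
--         keys_to_remove = []
--         for key, value in common_attrs.items():
--             if key not in concept_attrs or concept_attrs[key] != value:
--                 keys_to_remove.append(key)
--
--         for key in keys_to_remove:
--             common_attrs.pop(key, None)
--
--     return common_attrs
-- ===== SOURCE B (Python) =====
-- from typing import Dict, List, Any
--
-- def _extract_common_attributes(concepts: List[Dict[str, Any]]) -> Dict[str, Any]:
--     if not concepts:
--         return {}
--     first = concepts[0].get("attributes", {})
--     rest = [c.get("attributes", {}) for c in concepts[1:]]
--     return {k: v for k, v in first.items()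
--             if all(k in a and a[k] == v for a in rest)}
-- ===== Notes on version B (the rewrite author's own statement) =====
-- stated objective: simpler
-- what changed: Inverts the loop nesting: instead of copying the first concept's attributes and progressively deleting keys while iterating over the remaining concepts, B filters the first concept's attribute items once with a short-circuiting all() over the other concepts.
import Mathlib
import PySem

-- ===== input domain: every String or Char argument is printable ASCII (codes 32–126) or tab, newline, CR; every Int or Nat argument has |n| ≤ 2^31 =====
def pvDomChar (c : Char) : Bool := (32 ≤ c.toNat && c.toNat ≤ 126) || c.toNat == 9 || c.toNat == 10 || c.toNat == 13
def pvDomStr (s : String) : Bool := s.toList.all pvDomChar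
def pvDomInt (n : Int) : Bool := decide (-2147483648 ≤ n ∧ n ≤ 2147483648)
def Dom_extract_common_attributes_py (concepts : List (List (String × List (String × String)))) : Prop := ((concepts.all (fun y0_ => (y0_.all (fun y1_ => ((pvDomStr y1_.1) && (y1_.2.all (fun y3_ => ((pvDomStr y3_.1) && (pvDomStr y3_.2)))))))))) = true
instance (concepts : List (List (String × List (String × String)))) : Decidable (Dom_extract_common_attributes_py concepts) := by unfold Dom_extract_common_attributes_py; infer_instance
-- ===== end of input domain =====

-- B inverts the loop nesting: it filters the first concept's attribute items once with a
-- short-circuiting check over the remaining concepts, instead of A's progressive key deletion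
-- from a copied accumulator; objective: simpler.


-- shared input decoding: 'concept.get("attributes", {})' as a dict (the raw pair lists become Python dicts)
def pvAttrsOf (c : List (String × List (String × String))) : PySem.Dict String String :=
  PySem.Dict.ofList ((PySem.Dict.ofList c).getD "attributes" [])

-- ===== PORT A =====
-- one iteration of A's outer loop: collect keys_to_remove, then pop them
def pvAStep (common : PySem.Dict String String) (cattrs : PySem.Dict String String) :
    PySem.Dict String String :=
  let keysToRemove := common.items.foldl
    (fun acc p => if !(cattrs.get? p.1 == some p.2) then acc ++ [p.1] else acc) []
  keysToRemove.foldl (fun d k => d.erase k) common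

def extract_common_attributes_py (concepts : List (List (String × List (String × String)))) : List (String × String) :=
  match concepts with
  | [] => []
  | c0 :: rest =>
    (rest.foldl (fun common c => pvAStep common (pvAttrsOf c)) (pvAttrsOf c0)).items

-- ===== PORT B =====
def extract_common_attributes_py_alt (concepts : List (List (String × List (String × String)))) : List (String × String) :=
  match concepts with
  | [] => []
  | c0 :: tl =>
    let rest := tl.map pvAttrsOf
    (pvAttrsOf c0).items.filter (fun p => rest.all (fun a => a.get? p.1 == some p.2))

-- ===== PRECONDITION & SPEC =====
def Spec_extract_common_attributes_py (concepts : List (List (String × List (String × String)))) (out : List (String × String)) : Prop := out = extract_common_attributes_py_alt concepts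
instance (concepts : List (List (String × List (String × String)))) (out : List (String × String)) : Decidable (Spec_extract_common_attributes_py concepts out) := by unfold Spec_extract_common_attributes_py; infer_instance

-- ===== CLAIM (what is proved, stated in full; the proofs are below) =====
def Claim_equal_extract_common_attributes_py : Prop := ∀ (concepts : List (List (String × List (String × String)))), Dom_extract_common_attributes_py concepts → Spec_extract_common_attributes_py concepts (extract_common_attributes_py concepts)

-- ===== LEMMAS AND PROOFS =====

-- keys by definition
theorem pv_keys_eq (d : PySem.Dict String String) : d.keys = d.items.map (·.1) := rfl

-- folding erase over a list of keys filters the items by those keys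
theorem pv_erase_foldl_items (ks : List String) (d : PySem.Dict String String) :
    (ks.foldl (fun d k => d.erase k) d).items
      = d.items.filter (fun p => ks.all (fun k => !(p.1 == k))) := by
  induction ks generalizing d with
  | nil => simp
  | cons k ks ih =>
    rw [List.foldl_cons, ih]
    simp only [PySem.Dict.erase, List.filter_filter, List.all_cons]
    exact List.filter_congr (fun p _ => by simp [Bool.and_comm])

-- one iteration of A's outer loop is a filter, provided keys are distinct
theorem pv_step_items (common cattrs : PySem.Dict String String)
    (hnd : common.keys.Nodup) :
    (pvAStep common cattrs).items
      = common.items.filter (fun p => cattrs.get? p.1 == some p.2) := by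
  unfold pvAStep
  rw [PySem.List.foldl_append_if, List.nil_append, pv_erase_foldl_items]
  apply List.filter_congr
  intro p hp
  rw [pv_keys_eq] at hnd
  cases h : (cattrs.get? p.1 == some p.2) with
  | true =>
    simp only [List.all_eq_true, List.mem_map, List.mem_filter]
    intro k ⟨q, ⟨hq, hqbad⟩, hk⟩
    subst hk
    simp only [Bool.not_eq_eq_eq_not, Bool.not_true, beq_eq_false_iff_ne, ne_eq]
    intro hpq
    have hqa : q = p := List.inj_on_of_nodup_map hnd hq hp hpq.symm
    subst hqa
    rw [h] at hqbad
    simp at hqbad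
  | false =>
    have hmem : p.1 ∈ (common.items.filter (fun q => !(cattrs.get? q.1 == some q.2))).map (·.1) :=
      List.mem_map.2 ⟨p, List.mem_filter.2 ⟨hp, by simp [h]⟩, rfl⟩
    simp only [List.all_eq_false]
    exact ⟨p.1, hmem, by simp⟩

-- the step preserves distinctness of keys
theorem pv_step_nodup (common cattrs : PySem.Dict String String)
    (hnd : common.keys.Nodup) : (pvAStep common cattrs).keys.Nodup := by
  rw [pv_keys_eq, pv_step_items common cattrs hnd]
  exact (List.Sublist.map _ List.filter_sublist).nodup (by rw [pv_keys_eq] at hnd; exact hnd)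

-- A's whole outer loop is B's single filter
theorem pv_foldl_items (cs : List (PySem.Dict String String)) (d : PySem.Dict String String)
    (hnd : d.keys.Nodup) :
    (cs.foldl (fun common c => pvAStep common c) d).items
      = d.items.filter (fun p => cs.all (fun a => a.get? p.1 == some p.2)) := by
  induction cs generalizing d with
  | nil => simp
  | cons c cs ih =>
    rw [List.foldl_cons, ih _ (pv_step_nodup d c hnd), pv_step_items d c hnd,
      List.filter_filter]
    exact List.filter_congr (fun p _ => by simp [Bool.and_comm])

-- ===== VERDICT (by name: the statement is the Claim_ definition above) =====
theorem extract_common_attributes_py_spec : Claim_equal_extract_common_attributes_py := by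
  intro concepts _
  unfold Spec_extract_common_attributes_py
  cases concepts with
  | nil => rfl
  | cons c0 rest =>
    simp only [extract_common_attributes_py, extract_common_attributes_py_alt]
    rw [← List.foldl_map (f := pvAttrsOf) (g := fun common c => pvAStep common c),
      pv_foldl_items (rest.map pvAttrsOf) (pvAttrsOf c0) (PySem.Dict.nodup_keys_ofList _)]
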